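-- pv_equiv track=rewrite | github.com/klknet/geeks4geeks | algorithm/dp/max_num_of_A's.py | max_num_dp
-- ===== SOURCE A (Python) =====
-- def max_num_dp(n):
--     if n < 7:
--         return n
--     dp = [0] * (n+1)
--     for i in range(7):
--         dp[i] = i
--     for k in range(7, n+1):
--         max_num = 0
--         for i in range(k-3, 0, -1):
--             curr = (k - i - 1) * dp[i]
--             max_num = max(max_num, curr)
--         dp[k] = max_num
--     return dp[n]
-- ===== SOURCE B (Python) =====
-- def max_num_dp(n):
--     # O(n) sliding window: for k >= 7 only the breakpoints with multiplier
--     # 2..5 (i = k-3 .. k-6) can be optimal, so keep just the last six dp values.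
--     if n < 7:
--         return n
--     a, b, c, d, e, f = 1, 2, 3, 4, 5, 6
--     for _k in range(7, n + 1):
--         a, b, c, d, e, f = b, c, d, e, f, max(5 * a, 4 * b, 3 * c, 2 * d)
--     return f
-- ===== Notes on version B (the rewrite author's own statement) =====
-- stated objective: faster
-- what changed: Replaced the O(n^2) DP that rescans all breakpoints i=1..k-3 for every k by an O(n) sliding window of the last six dp values, using the proved fact that only multipliers 2..5 (i = k-3..k-6) can attain the maximum.
import Mathlib
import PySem

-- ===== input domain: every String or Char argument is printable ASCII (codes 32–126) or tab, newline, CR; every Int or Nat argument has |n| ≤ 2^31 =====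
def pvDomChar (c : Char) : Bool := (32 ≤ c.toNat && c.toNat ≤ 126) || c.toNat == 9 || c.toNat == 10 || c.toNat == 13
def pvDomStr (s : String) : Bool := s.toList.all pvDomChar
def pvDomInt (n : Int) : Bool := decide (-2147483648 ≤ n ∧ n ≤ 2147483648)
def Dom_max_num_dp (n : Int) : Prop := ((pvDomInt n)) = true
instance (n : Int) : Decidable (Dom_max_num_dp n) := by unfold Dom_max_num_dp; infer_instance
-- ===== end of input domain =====

-- B replaces A's O(n^2) scan over all breakpoints by an O(n) sliding window of the
-- last six dp values (only multipliers 2..5 can be optimal).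

-- ===== PORT A =====
def max_num_dp (n : Int) : Int :=
  if n < 7 then n
  else
    let dp0 := PySem.List.pyRepeat [(0 : Int)] (n + 1)
    let dp1 := (PySem.List.pyRange 0 7 1).foldl (fun dp i => PySem.List.pySetD dp i i) dp0
    let dp2 := (PySem.List.pyRange 7 (n + 1) 1).foldl
      (fun dp k =>
        PySem.List.pySetD dp k
          ((PySem.List.pyRange (k - 3) 0 (-1)).foldl
            (fun max_num i => max max_num ((k - i - 1) * PySem.List.pyGetD dp i 0)) 0))
      dp1
    PySem.List.pyGetD dp2 n 0

-- ===== PORT B =====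
def max_num_dp_alt (n : Int) : Int :=
  if n < 7 then n
  else
    let s := (PySem.List.pyRange 7 (n + 1) 1).foldl
      (fun (s : Int × Int × Int × Int × Int × Int) _k =>
        match s with
        | (a, b, c, d, e, f) => (b, c, d, e, f, max (max (max (5 * a) (4 * b)) (3 * c)) (2 * d)))
      (1, 2, 3, 4, 5, 6)
    s.2.2.2.2.2

-- ===== PRECONDITION & SPEC =====
def Spec_max_num_dp (n : Int) (out : Int) : Prop := out = max_num_dp_alt n
instance (n : Int) (out : Int) : Decidable (Spec_max_num_dp n out) := by unfold Spec_max_num_dp; infer_instance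

-- ===== CLAIM (what is proved, stated in full; the proofs are below) =====
def Claim_equal_max_num_dp : Prop := ∀ (n : Int), Dom_max_num_dp n → Spec_max_num_dp n (max_num_dp n)

-- ===== LEMMAS AND PROOFS =====

-- the common dp value: G i = dp[i]
def G (i : Int) : Int :=
  if _h : i ≤ 6 then i
  else max (max (max (5 * G (i - 6)) (4 * G (i - 5))) (3 * G (i - 4))) (2 * G (i - 3))
termination_by i.toNat
decreasing_by all_goals omega

theorem G_le6 (i : Int) (h : i ≤ 6) : G i = i := by rw [G]; simp [h]

theorem G_rec (i : Int) (h : 7 ≤ i) :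
    G i = max (max (max (5 * G (i - 6)) (4 * G (i - 5))) (3 * G (i - 4))) (2 * G (i - 3)) := by
  rw [G]; simp [show ¬ i ≤ 6 by omega]

theorem G_pos (i : Int) (h : 1 ≤ i) : 1 ≤ G i := by
  suffices H : ∀ m : Nat, ∀ i : Int, i.toNat = m → 1 ≤ i → 1 ≤ G i from H i.toNat i rfl h
  intro m
  induction m using Nat.strong_induction_on with
  | _ m ih =>
    intro i him hi
    by_cases h6 : i ≤ 6
    · rw [G_le6 i h6]; omega
    · rw [G_rec i (by omega)]
      have h3 := ih (i - 3).toNat (by omega) (i - 3) rfl (by omega)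
      omega

theorem G_ratio (i : Int) (h : 1 ≤ i) : 6 * G i ≤ 5 * G (i + 1) := by
  suffices H : ∀ m : Nat, ∀ i : Int, i.toNat = m → 1 ≤ i → 6 * G i ≤ 5 * G (i + 1) from
    H i.toNat i rfl h
  intro m
  induction m using Nat.strong_induction_on with
  | _ m ih =>
    intro i him hi
    by_cases h5 : i ≤ 5
    · rw [G_le6 i (by omega), G_le6 (i + 1) (by omega)]; omega
    · by_cases h6 : i ≤ 6
      · have hi6 : i = 6 := by omega
        subst hi6
        rw [show (6:Int) + 1 = 7 by norm_num, G_le6 6 (by norm_num), G_rec 7 (by norm_num),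
            show (7:Int) - 6 = 1 by norm_num, show (7:Int) - 5 = 2 by norm_num,
            show (7:Int) - 4 = 3 by norm_num, show (7:Int) - 3 = 4 by norm_num,
            G_le6 1 (by norm_num), G_le6 2 (by norm_num), G_le6 3 (by norm_num),
            G_le6 4 (by norm_num)]
        omega
      · rw [G_rec i (by omega), G_rec (i + 1) (by omega)]
        have e1 : i + 1 - 6 = i - 5 := by ring
        have e2 : i + 1 - 5 = i - 4 := by ring
        have e3 : i + 1 - 4 = i - 3 := by ring
        have e4 : i + 1 - 3 = i - 2 := by ring
        rw [e1, e2, e3, e4]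
        have r6 := ih (i - 6).toNat (by omega) (i - 6) rfl (by omega)
        have r5 := ih (i - 5).toNat (by omega) (i - 5) rfl (by omega)
        have r4 := ih (i - 4).toNat (by omega) (i - 4) rfl (by omega)
        have r3 := ih (i - 3).toNat (by omega) (i - 3) rfl (by omega)
        have e5 : i - 6 + 1 = i - 5 := by ring
        have e6 : i - 5 + 1 = i - 4 := by ring
        have e7 : i - 4 + 1 = i - 3 := by ring
        have e8 : i - 3 + 1 = i - 2 := by ring
        rw [e5] at r6; rw [e6] at r5; rw [e7] at r4; rw [e8] at r3
        have p6 := G_pos (i - 6) (by omega)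
        have p5 := G_pos (i - 5) (by omega)
        have p4 := G_pos (i - 4) (by omega)
        have p3 := G_pos (i - 3) (by omega)
        omega

-- dominated breakpoints: multiplier ≥ 6 never beats the next one
theorem cand_chain (k i : Int) (h1 : 1 ≤ i) (h2 : i ≤ k - 7) :
    (k - i - 1) * G i ≤ (k - i - 2) * G (i + 1) := by
  have hr := G_ratio i h1
  have hp' := G_pos (i + 1) (by omega)
  nlinarith [mul_le_mul_of_nonneg_left hr (show (0:Int) ≤ k - i - 1 by omega),
             mul_nonneg (show (0:Int) ≤ k - i - 7 by omega) (show (0:Int) ≤ G (i + 1) by omega)]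

-- folding max over a dominated descending tail changes nothing
theorem fold_drop (c : Int → Int) (B : Int) (hc : ∀ i, 1 ≤ i → i ≤ B → c i ≤ c (i + 1)) :
    ∀ (j : Nat) (m M : Int), m = (j : Int) → m ≤ B → c (m + 1) ≤ M →
      (PySem.List.pyRange m 0 (-1)).foldl (fun mx i => max mx (c i)) M = M := by
  intro j
  induction j with
  | zero =>
    intro m M hm _ _
    rw [PySem.List.pyRange_neg_one_eq_nil (by omega)]
    rfl
  | succ j ih =>
    intro m M hm hB hM
    rw [PySem.List.pyRange_neg_one_cons (show (0:Int) < m by omega)]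
    simp only [List.foldl_cons]
    have hcm : c m ≤ M := le_trans (hc m (by omega) hB) hM
    rw [max_eq_left hcm]
    exact ih (m - 1) M (by omega) (by omega) (by rw [show m - 1 + 1 = m by ring]; exact hcm)

-- the inner loop of A computes exactly the window maximum G k
theorem inner_eq (k : Int) (hk : 7 ≤ k) (c : Int → Int)
    (hcd : ∀ i, 1 ≤ i → i ≤ k - 3 → c i = (k - i - 1) * G i) :
    (PySem.List.pyRange (k - 3) 0 (-1)).foldl (fun mx i => max mx (c i)) 0 = G k := by
  rw [PySem.List.pyRange_neg_one_cons (show (0:Int) < k - 3 by omega),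
      show k - 3 - 1 = k - 4 by ring,
      PySem.List.pyRange_neg_one_cons (show (0:Int) < k - 4 by omega),
      show k - 4 - 1 = k - 5 by ring,
      PySem.List.pyRange_neg_one_cons (show (0:Int) < k - 5 by omega),
      show k - 5 - 1 = k - 6 by ring,
      PySem.List.pyRange_neg_one_cons (show (0:Int) < k - 6 by omega),
      show k - 6 - 1 = k - 7 by ring]
  simp only [List.foldl_cons]
  rw [fold_drop c (k - 7)
        (fun i hi hiB => by
          rw [hcd i hi (by omega), hcd (i + 1) (by omega) (by omega)]
          rw [show k - (i + 1) - 1 = k - i - 2 by ring]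
          exact cand_chain k i hi hiB)
        (k - 7).toNat (k - 7) _ (by omega) (by omega)
        (by rw [show k - 7 + 1 = k - 6 by ring]; exact le_max_right _ _)]
  rw [hcd (k - 3) (by omega) (by omega), hcd (k - 4) (by omega) (by omega),
      hcd (k - 5) (by omega) (by omega), hcd (k - 6) (by omega) (by omega),
      show k - (k - 3) - 1 = 2 by ring, show k - (k - 4) - 1 = 3 by ring,
      show k - (k - 5) - 1 = 4 by ring, show k - (k - 6) - 1 = 5 by ring,
      G_rec k hk]
  have p3 := G_pos (k - 3) (by omega)
  omega

-- getD/setD on Int indices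
theorem getD_setD (xs : List Int) (i v m : Int) (h0 : 0 ≤ i) (h1 : i < (xs.length : Int))
    (hm0 : 0 ≤ m) :
    PySem.List.pyGetD (PySem.List.pySetD xs i v) m 0 =
      if m = i then v else PySem.List.pyGetD xs m 0 := by
  have hi : i = ((i.toNat : Nat) : Int) := by omega
  have hm : m = ((m.toNat : Nat) : Int) := by omega
  rw [hi, hm, PySem.List.pyGetD_pySetD_natCast xs i.toNat m.toNat v 0 (by omega)]
  split_ifs <;> first | rfl | (exfalso; omega)

-- the invariant of A's outer loop
theorem outer_inv (n : Int) (dp1 : List Int) (hlen : (dp1.length : Int) = n + 1)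
    (hval : ∀ i : Int, 0 ≤ i → i < 7 → PySem.List.pyGetD dp1 i 0 = G i) :
    ∀ (j : Nat) (K : Int), K = 7 + (j : Int) → K ≤ n + 1 →
      (((PySem.List.pyRange 7 K).foldl
          (fun dp k =>
            PySem.List.pySetD dp k
              ((PySem.List.pyRange (k - 3) 0 (-1)).foldl
                (fun max_num i => max max_num ((k - i - 1) * PySem.List.pyGetD dp i 0)) 0))
          dp1).length : Int) = n + 1 ∧
      ∀ i : Int, 0 ≤ i → i < K →
        PySem.List.pyGetD
          ((PySem.List.pyRange 7 K).foldl
            (fun dp k =>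
              PySem.List.pySetD dp k
                ((PySem.List.pyRange (k - 3) 0 (-1)).foldl
                  (fun max_num i => max max_num ((k - i - 1) * PySem.List.pyGetD dp i 0)) 0))
            dp1) i 0 = G i := by
  intro j
  induction j with
  | zero =>
    intro K hK hKn
    rw [PySem.List.pyRange_one_eq_nil (by omega)]
    exact ⟨hlen, fun i h0 h7 => hval i h0 (by omega)⟩
  | succ j ih =>
    intro K hK hKn
    obtain ⟨ihl, ihv⟩ := ih (K - 1) (by omega) (by omega)
    rw [show K = (K - 1) + 1 by ring, PySem.List.pyRange_one_succ_right (by omega),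
        List.foldl_append]
    simp only [List.foldl_cons, List.foldl_nil]
    set dpP := (PySem.List.pyRange 7 (K - 1)).foldl
      (fun dp k =>
        PySem.List.pySetD dp k
          ((PySem.List.pyRange (k - 3) 0 (-1)).foldl
            (fun max_num i => max max_num ((k - i - 1) * PySem.List.pyGetD dp i 0)) 0))
      dp1 with hdpP
    have hin : (PySem.List.pyRange (K - 1 - 3) 0 (-1)).foldl
        (fun max_num i => max max_num ((K - 1 - i - 1) * PySem.List.pyGetD dpP i 0)) 0
        = G (K - 1) := by
      have := inner_eq (K - 1) (by omega)
        (fun i => (K - 1 - i - 1) * PySem.List.pyGetD dpP i 0)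
        (fun i hi hik => by
          show (K - 1 - i - 1) * PySem.List.pyGetD dpP i 0 = (K - 1 - i - 1) * G i
          rw [ihv i (by omega) (by omega)])
      exact this
    rw [hin]
    constructor
    · rw [PySem.List.length_pySetD]; exact ihl
    · intro i h0 hiK
      rw [getD_setD dpP (K - 1) (G (K - 1)) i (by omega) (by omega) h0]
      by_cases hie : i = K - 1
      · rw [if_pos hie, hie]
      · rw [if_neg hie]; exact ihv i h0 (by omega)

theorem max_num_dp_eq_G (n : Int) (hn : ¬ n < 7) : max_num_dp n = G n := by
  unfold max_num_dp
  rw [if_neg hn]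
  have h1 : PySem.List.pyRange 0 7 1 = [0, 1, 2, 3, 4, 5, 6] := by decide
  simp only [h1, List.foldl_cons, List.foldl_nil, PySem.List.pyRepeat_singleton]
  set dp1 := PySem.List.pySetD (PySem.List.pySetD (PySem.List.pySetD (PySem.List.pySetD
    (PySem.List.pySetD (PySem.List.pySetD (PySem.List.pySetD
      (List.replicate (n + 1).toNat (0 : Int)) 0 0) 1 1) 2 2) 3 3) 4 4) 5 5) 6 6 with hdp1
  have hlen : (dp1.length : Int) = n + 1 := by
    rw [hdp1]
    simp only [PySem.List.length_pySetD, List.length_replicate]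
    omega
  have hrep : ∀ m : Int, 0 ≤ m → m < 7 →
      PySem.List.pyGetD (List.replicate (n + 1).toNat (0 : Int)) m 0 = 0 := by
    intro m h0 h7
    rw [PySem.List.pyGetD_eq_getElem _ _ h0 (by simp; omega)]
    simp
  have hval : ∀ i : Int, 0 ≤ i → i < 7 → PySem.List.pyGetD dp1 i 0 = G i := by
    intro i h0 h7
    rw [hdp1]
    rw [getD_setD _ _ _ _ (by norm_num) (by simp only [PySem.List.length_pySetD, List.length_replicate]; omega) h0,
        getD_setD _ _ _ _ (by norm_num) (by simp only [PySem.List.length_pySetD, List.length_replicate]; omega) h0,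
        getD_setD _ _ _ _ (by norm_num) (by simp only [PySem.List.length_pySetD, List.length_replicate]; omega) h0,
        getD_setD _ _ _ _ (by norm_num) (by simp only [PySem.List.length_pySetD, List.length_replicate]; omega) h0,
        getD_setD _ _ _ _ (by norm_num) (by simp only [PySem.List.length_pySetD, List.length_replicate]; omega) h0,
        getD_setD _ _ _ _ (by norm_num) (by simp only [PySem.List.length_pySetD, List.length_replicate]; omega) h0,
        getD_setD _ _ _ _ (by norm_num) (by simp only [List.length_replicate]; omega) h0]
    rw [G_le6 i (by omega)]
    split_ifs <;> omega
  obtain ⟨_, hv⟩ := outer_inv n dp1 hlen hval (n + 1 - 7).toNat (n + 1) (by omega) (by omega)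
  exact hv n (by omega) (by omega)

-- the invariant of B's window loop
theorem alt_inv (n : Int) :
    ∀ (j : Nat) (K : Int), K = 7 + (j : Int) → K ≤ n + 1 →
      (PySem.List.pyRange 7 K).foldl
        (fun (s : Int × Int × Int × Int × Int × Int) _k =>
          match s with
          | (a, b, c, d, e, f) => (b, c, d, e, f, max (max (max (5 * a) (4 * b)) (3 * c)) (2 * d)))
        (1, 2, 3, 4, 5, 6)
      = (G (K - 6), G (K - 5), G (K - 4), G (K - 3), G (K - 2), G (K - 1)) := by
  intro j
  induction j with
  | zero =>
    intro K hK hKn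
    rw [PySem.List.pyRange_one_eq_nil (by omega)]
    simp only [List.foldl_nil]
    rw [G_le6 (K - 6) (by omega), G_le6 (K - 5) (by omega), G_le6 (K - 4) (by omega),
        G_le6 (K - 3) (by omega), G_le6 (K - 2) (by omega), G_le6 (K - 1) (by omega)]
    have : K = 7 := by omega
    subst this
    norm_num
  | succ j ih =>
    intro K hK hKn
    rw [show K = (K - 1) + 1 by ring, PySem.List.pyRange_one_succ_right (by omega),
        List.foldl_append, ih (K - 1) (by omega) (by omega)]
    simp only [List.foldl_cons, List.foldl_nil]
    rw [show K - 1 + 1 - 6 = K - 6 by ring, show K - 1 + 1 - 5 = K - 5 by ring,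
        show K - 1 + 1 - 4 = K - 4 by ring, show K - 1 + 1 - 3 = K - 3 by ring,
        show K - 1 + 1 - 2 = K - 2 by ring, show K - 1 + 1 - 1 = K - 1 by ring,
        G_rec (K - 1) (by omega),
        show K - 1 - 6 = K - 7 by ring, show K - 1 - 5 = K - 6 by ring,
        show K - 1 - 4 = K - 5 by ring, show K - 1 - 3 = K - 4 by ring,
        show K - 1 - 2 = K - 3 by ring, show K - 1 - 1 = K - 2 by ring]

theorem max_num_dp_alt_eq_G (n : Int) (hn : ¬ n < 7) : max_num_dp_alt n = G n := by
  unfold max_num_dp_alt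
  rw [if_neg hn]
  have := alt_inv n (n + 1 - 7).toNat (n + 1) (by omega) (by omega)
  simp only [this]
  rw [show n + 1 - 1 = n by ring]

-- ===== VERDICT (by name: the statement is the Claim_ definition above) =====
theorem max_num_dp_spec : Claim_equal_max_num_dp := by
  intro n _
  unfold Spec_max_num_dp
  by_cases h : n < 7
  · simp [max_num_dp, max_num_dp_alt, h]
  · rw [max_num_dp_eq_G n h, max_num_dp_alt_eq_G n h]
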